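-- pv_equiv track=rewrite | github.com/victorwegeborn/folk-rnn | analyzer.py | sort_by_label
-- ===== SOURCE A (Python) =====
-- def sort_by_label(data):
--     labels = []
--     values = []
--     for key, val in data.items():
--         labels.append(key)
--         values.append(val)
--     values = [v for _,v in sorted(zip(labels, values))]
--     labels = sorted(labels)
--     return labels, values
-- ===== SOURCE B (Python) =====
-- def sort_by_label(data):
--     labels = sorted(data)
--     values = [data[k] for k in labels]
--     return labels, values
-- ===== Notes on version B (the rewrite author's own statement) =====
-- stated objective: simpler
-- what changed: B sorts the key list once and recovers each value by dict lookup, instead of A's two sorts (one over zipped (key,value) pairs) plus an unzip comprehension.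
import Mathlib
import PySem

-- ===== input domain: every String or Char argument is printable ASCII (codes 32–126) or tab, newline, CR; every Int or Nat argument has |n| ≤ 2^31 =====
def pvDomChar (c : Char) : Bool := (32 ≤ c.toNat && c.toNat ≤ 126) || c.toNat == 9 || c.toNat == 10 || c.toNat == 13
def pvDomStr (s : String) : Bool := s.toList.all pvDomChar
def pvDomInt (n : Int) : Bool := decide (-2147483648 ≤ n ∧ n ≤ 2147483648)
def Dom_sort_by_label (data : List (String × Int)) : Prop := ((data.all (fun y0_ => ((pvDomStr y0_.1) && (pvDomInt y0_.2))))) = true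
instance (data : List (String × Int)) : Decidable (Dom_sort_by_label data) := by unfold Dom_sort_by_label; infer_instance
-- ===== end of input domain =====

-- B sorts the key list once and recovers each value by dict lookup (simpler than A's
-- double sort over zipped pairs plus an unzip comprehension); equivalence on dict inputs (unique keys).


-- ===== PORT A =====
def sort_by_label (data : List (String × Int)) : List String × List Int :=
  let labels := data.foldl (fun acc kv => acc ++ [kv.1]) ([] : List String)
  let values := data.foldl (fun acc kv => acc ++ [kv.2]) ([] : List Int)
  -- sorted(zip(labels, values)) sorts pairs by Python tuple order (key, then value)
  let values2 := (PySem.List.sorted2 (labels.zip values) (fun p => p.1) (fun p => p.2) false).map (fun p => p.2)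
  let labels2 := PySem.List.sorted labels (fun k => k) false
  (labels2, values2)

-- ===== PORT B =====
-- data[k] never raises KeyError here since k is drawn from data's keys; getD's default is never used.
def sort_by_label_alt (data : List (String × Int)) : List String × List Int :=
  let labels := PySem.List.sorted (data.map (fun kv => kv.1)) (fun k => k) false
  let values := labels.map (fun k => (PySem.Dict.mk data).getD k 0)
  (labels, values)

-- ===== PRECONDITION & SPEC =====
-- Pre_ restricts the association list to distinct keys: the Python argument is a dict, whose keys
-- are necessarily unique, so duplicate-key lists represent no Python input at all.
def Pre_sort_by_label (data : List (String × Int)) : Prop := (data.map Prod.fst).Nodup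
instance (data : List (String × Int)) : Decidable (Pre_sort_by_label data) := by unfold Pre_sort_by_label; infer_instance
def pvWitness_sort_by_label : (List (String × Int)) := [("a", 1), ("b", 2)]

def Spec_sort_by_label (data : List (String × Int)) (out : List String × List Int) : Prop := out = sort_by_label_alt data
instance (data : List (String × Int)) (out : List String × List Int) : Decidable (Spec_sort_by_label data out) := by unfold Spec_sort_by_label; infer_instance

-- ===== CLAIM (what is proved, stated in full; the proofs are below) =====
def Claim_equal_sort_by_label : Prop := ∀ (data : List (String × Int)), Dom_sort_by_label data → Pre_sort_by_label data → Spec_sort_by_label data (sort_by_label data)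

-- ===== LEMMAS AND PROOFS =====

-- insertBy with comparators that agree against every element of the accumulator
theorem insertBy_congr {α : Type} (b b' : α → α → Bool) (x : α) (acc : List α)
    (h : ∀ y ∈ acc, b x y = b' x y) :
    PySem.List.insertBy b x acc = PySem.List.insertBy b' x acc := by
  induction acc with
  | nil => rfl
  | cons y ys ih =>
    simp only [PySem.List.insertBy]
    rw [h y (by simp)]
    by_cases hb : b' x y = true
    · simp [hb]
    · simp [hb, ih (fun z hz => h z (by simp [hz]))]

-- a sort-by-insertBy loop only depends on the comparator's values on pairs drawn from acc ∪ xs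
theorem foldl_insertBy_congr {α : Type} (b b' : α → α → Bool) (S : List α) :
    ∀ (xs acc : List α), (∀ y ∈ xs, y ∈ S) → (∀ y ∈ acc, y ∈ S) →
    (∀ a ∈ S, ∀ c ∈ S, b a c = b' a c) →
    xs.foldl (fun acc x => PySem.List.insertBy b x acc) acc
      = xs.foldl (fun acc x => PySem.List.insertBy b' x acc) acc := by
  intro xs
  induction xs with
  | nil => intro acc _ _ _; rfl
  | cons x t ih =>
    intro acc hxs hacc hS
    simp only [List.foldl_cons]
    rw [insertBy_congr b b' x acc (fun y hy => hS x (hxs x (by simp)) y (hacc y hy)), ih]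
    · intro y hy; exact hxs y (by simp [hy])
    · intro y hy
      rcases (PySem.List.mem_insertBy b' x y acc).1 hy with h | h
      · exact h ▸ hxs x (by simp)
      · exact hacc y h
    · exact hS

-- on a list with pairwise-distinct keys, sorting pairs by Python tuple order is sorting by the key alone
theorem sorted2_eq_sorted_fst (data : List (String × Int)) (h : (data.map Prod.fst).Nodup) :
    PySem.List.sorted2 data (fun p => p.1) (fun p => p.2) false
      = PySem.List.sorted data (fun p => p.1) false := by
  have hinj : ∀ a ∈ data, ∀ c ∈ data, a.1 = c.1 → a = c := by
    induction data with
    | nil => intro a ha; simp at ha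
    | cons p t ih =>
      intro a ha c hc hfst
      have hp : p.1 ∉ t.map Prod.fst := by
        simp only [List.map_cons, List.nodup_cons] at h; exact h.1
      have ht : (t.map Prod.fst).Nodup := by
        simp only [List.map_cons, List.nodup_cons] at h; exact h.2
      rcases List.mem_cons.1 ha with rfl | ha' <;> rcases List.mem_cons.1 hc with rfl | hc'
      · rfl
      · exact absurd (hfst ▸ List.mem_map_of_mem hc') hp
      · exact absurd (hfst ▸ List.mem_map_of_mem ha') hp
      · exact ih ht a ha' c hc' hfst
  simp only [PySem.List.sorted2, PySem.List.sorted]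
  apply foldl_insertBy_congr _ _ data data [] (fun y hy => hy) (by simp)
  intro a ha c hc
  by_cases heq : a.1 = c.1
  · have : a = c := hinj a ha c hc heq
    subst this
    simp
  · by_cases hlt : a.1 < c.1
    · simp [hlt]
    · have : c.1 < a.1 := lt_of_le_of_ne (not_lt.1 hlt) (fun e => heq e.symm)
      simp [hlt, this]

-- projecting a stable sort through its own key equals sorting the projected list
theorem map_insertBy_key {α κ : Type} [LinearOrder κ] (key : α → κ) (x : α) (acc : List α) :
    (PySem.List.insertBy (fun a b => decide (key a < key b)) x acc).map key
      = PySem.List.insertBy (fun u v => decide (u < v)) (key x) (acc.map key) := by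
  induction acc with
  | nil => rfl
  | cons y ys ih =>
    simp only [PySem.List.insertBy, List.map_cons]
    by_cases hb : key x < key y
    · simp [hb]
    · simp [hb, ih]

theorem map_sorted_key {α κ : Type} [LinearOrder κ] (key : α → κ) (xs : List α) :
    (PySem.List.sorted xs key false).map key
      = PySem.List.sorted (xs.map key) (fun k => k) false := by
  simp only [PySem.List.sorted]
  suffices h : ∀ (acc : List α),
      (xs.foldl (fun acc x => PySem.List.insertBy (fun a b => decide (key a < key b)) x acc) acc).map key
        = (xs.map key).foldl (fun acc u => PySem.List.insertBy (fun u v => decide (u < v)) u acc) (acc.map key) by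
    exact h []
  induction xs with
  | nil => intro acc; rfl
  | cons x t ih =>
    intro acc
    simp only [List.foldl_cons, List.map_cons, ih, map_insertBy_key]

-- on a distinct-key list, B's dict lookup recovers exactly the pair's own value
theorem lookup_of_mem (data : List (String × Int)) (h : (data.map Prod.fst).Nodup)
    (p : String × Int) (hp : p ∈ data) :
    (PySem.Dict.mk data).getD p.1 0 = p.2 :=
  PySem.Dict.getD_of_mem_items (d := PySem.Dict.mk data) (k := p.1) (v := p.2) hp h 0

-- ===== VERDICT (by name: the statement is the Claim_ definition above) =====
theorem sort_by_label_spec : Claim_equal_sort_by_label := by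
  intro data _ hpre
  unfold Spec_sort_by_label sort_by_label sort_by_label_alt
  simp only [PySem.List.foldl_append_singleton_eq_map, List.nil_append]
  have hzip : (data.map Prod.fst).zip (data.map Prod.snd) = data := by
    rw [List.zip_map']; simp
  rw [hzip]
  have hpre' : (data.map Prod.fst).Nodup := hpre
  rw [sorted2_eq_sorted_fst data hpre']
  refine Prod.ext ?_ ?_
  · rfl
  · show (PySem.List.sorted data (fun p => p.1) false).map (fun p => p.2)
      = (PySem.List.sorted (data.map (fun kv => kv.1)) (fun k => k) false).map
          (fun k => (PySem.Dict.mk data).getD k 0)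
    rw [← map_sorted_key (fun p => p.1) data, List.map_map]
    apply List.map_congr_left
    intro p hp
    have hmem : p ∈ data := (PySem.List.mem_sorted _ _ _ _).1 hp
    exact (lookup_of_mem data hpre' p hmem).symm
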